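-- pv_equiv track=rewrite | github.com/BhavinPatel7337/aoc2020 | day10/day10.py | run_lengths
-- ===== SOURCE A (Python) =====
-- def run_lengths(differences):
--     f = lambda x: sum(differences[i:i + x] == [1] * x for i in range(len(differences)))
--     n = 1
--     l = []
--     while f(n + 1):
--         n += 1
--     while n > 1:
--         r = list(range(len(l) + 1, 1, -1))
--         x = f(n) - sum([x * y for x,y in zip(l, r)])
--         l.append(x)
--         n -= 1
--     return l
-- ===== SOURCE B (Python) =====
-- def run_lengths(differences):
--     counts = {}
--     longest = 0
--     cur = 0
--     for d in differences + [0]: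
--         if d == 1:
--             cur += 1
--         elif cur:
--             counts[cur] = counts.get(cur, 0) + 1
--             if cur > longest:
--                 longest = cur
--             cur = 0
--     return [counts.get(k, 0) for k in range(longest, 1, -1)]
-- ===== Notes on version B (the rewrite author's own statement) =====
-- stated objective: faster
-- what changed: A repeatedly rescans every slice of the list (a quadratic window-count f evaluated for each candidate run length, plus an inclusion-exclusion loop); B does one linear scan tallying maximal run lengths of 1s into a dict and emits the counts from the longest run down to 2.
import Mathlib
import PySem

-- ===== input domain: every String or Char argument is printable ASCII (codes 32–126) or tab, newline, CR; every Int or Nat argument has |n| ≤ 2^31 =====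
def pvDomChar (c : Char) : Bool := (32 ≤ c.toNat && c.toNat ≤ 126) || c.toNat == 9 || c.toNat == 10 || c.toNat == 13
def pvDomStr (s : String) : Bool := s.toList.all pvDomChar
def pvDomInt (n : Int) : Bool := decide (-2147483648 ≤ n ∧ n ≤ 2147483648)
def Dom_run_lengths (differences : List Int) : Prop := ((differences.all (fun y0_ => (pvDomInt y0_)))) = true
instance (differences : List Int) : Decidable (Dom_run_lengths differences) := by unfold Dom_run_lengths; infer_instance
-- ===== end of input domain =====

-- B replaces A's repeated whole-list window rescans with one linear scan tallying maximal runs of 1s into a dict (objective: faster).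

-- ===== PORT A =====
def fA (d : List Int) (x : Int) : Int :=
  ((PySem.List.pyRange 0 (d.length : Int) 1).map (fun i =>
    if PySem.List.slice d (some i) (some (i + x)) = PySem.List.pyRepeat [(1:Int)] x then (1:Int) else 0)).sum


def loop1A (d : List Int) : Nat → Int → Int
  | 0, n => n
  | fuel+1, n => if fA d (n + 1) ≠ 0 then loop1A d fuel (n + 1) else n


def loop2A (d : List Int) (n : Int) (l : List Int) : List Int :=
  if h : 1 < n then
    let r := PySem.List.pyRange ((l.length : Int) + 1) 1 (-1)
    let x := fA d n - ((l.zip r).map (fun p => p.1 * p.2)).sum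
    loop2A d (n - 1) (l ++ [x])
  else l
termination_by n.toNat
decreasing_by omega


def run_lengths (differences : List Int) : List Int :=
  loop2A differences (loop1A differences (differences.length + 1) 1) []

-- ===== PORT B =====
def stepB (s : PySem.Dict Int Int × Int × Int) (d : Int) : PySem.Dict Int Int × Int × Int :=
  match s with
  | (counts, longest, cur) =>
    if d = 1 then (counts, longest, cur + 1)
    else if cur ≠ 0 then
      (counts.insert cur (counts.getD cur 0 + 1), (if cur > longest then cur else longest), 0)
    else (counts, longest, cur)


def run_lengths_alt (differences : List Int) : List Int :=
  let s := (differences ++ [0]).foldl stepB (PySem.Dict.empty, 0, 0)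
  (PySem.List.pyRange s.2.1 1 (-1)).map (fun k => s.1.getD k 0)

-- ===== PRECONDITION & SPEC =====
def Spec_run_lengths (differences : List Int) (out : List Int) : Prop := out = run_lengths_alt differences
instance (differences : List Int) (out : List Int) : Decidable (Spec_run_lengths differences out) := by unfold Spec_run_lengths; infer_instance

-- ===== CLAIM (what is proved, stated in full; the proofs are below) =====
def Claim_equal_run_lengths : Prop := ∀ (differences : List Int), Dom_run_lengths differences → Spec_run_lengths differences (run_lengths differences)

-- ===== LEMMAS AND PROOFS =====

def leadOnes : List Int → Nat
  | [] => 0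
  | a :: t => if a = 1 then leadOnes t + 1 else 0


def runsA : List Int → Nat → List Nat
  | [], c => if 0 < c then [c] else []
  | a :: t, c => if a = 1 then runsA t (c + 1) else if 0 < c then c :: runsA t 0 else runsA t 0


def wcnt (d : List Int) (m : Nat) : Nat :=
  (List.range d.length).countP (fun i => (d.drop i).take m == List.replicate m 1)


def G (rs : List Nat) (m : Nat) : Nat := (rs.map (fun L => L + 1 - m)).sum


lemma take_replicate_iff (l : List Int) (m : Nat) :
    (l.take m = List.replicate m 1) ↔ m ≤ leadOnes l := by
  induction l generalizing m with
  | nil => cases m <;> simp [leadOnes]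
  | cons a t ih =>
    cases m with
    | zero => simp
    | succ m =>
      simp only [List.take_succ_cons, List.replicate_succ, List.cons.injEq, leadOnes, ih]
      by_cases h : a = 1 <;> simp [h] <;> omega


lemma wcnt_nil (m : Nat) : wcnt [] m = 0 := by simp [wcnt]


lemma wcnt_cons (a : Int) (t : List Int) (m : Nat) :
    wcnt (a :: t) m = (if m ≤ leadOnes (a :: t) then 1 else 0) + wcnt t m := by
  simp only [wcnt, List.length_cons, List.range_succ_eq_map, List.countP_cons, List.countP_map]
  have h1 : (List.countP ((fun i => (List.drop i (a :: t)).take m == List.replicate m 1) ∘ Nat.succ)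
      (List.range t.length)) = List.countP (fun i => (List.drop i t).take m == List.replicate m 1) (List.range t.length) := by
    apply List.countP_congr; intro i _; simp [Function.comp]
  rw [h1]
  have h2 : ((List.drop 0 (a :: t)).take m == List.replicate m 1) = decide (m ≤ leadOnes (a :: t)) := by
    simp only [List.drop_zero]
    rw [Bool.eq_iff_iff]; simp [take_replicate_iff]
  rw [h2]
  by_cases h : m ≤ leadOnes (a :: t) <;> simp [h] <;> omega


lemma G_runsA (d : List Int) (m : Nat) (hm : 1 ≤ m) :
    ∀ c, G (runsA d c) m + (leadOnes d + 1 - m) = wcnt d m + (c + leadOnes d + 1 - m) := by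
  induction d with
  | nil =>
    intro c
    by_cases h : 0 < c <;> simp [runsA, G, wcnt_nil, leadOnes, h] <;> omega
  | cons a t ih =>
    intro c
    rw [wcnt_cons]
    by_cases h : a = 1
    · subst h
      have := ih (c + 1)
      simp only [runsA, leadOnes, if_pos rfl]
      by_cases h2 : m ≤ leadOnes t + 1 <;> simp only [h2, if_true, if_false] <;> omega
    · have := ih 0
      simp only [runsA, if_neg h, leadOnes]
      rw [if_neg (by omega : ¬ m ≤ (0:Nat))]
      by_cases hc : 0 < c
      · simp only [if_pos hc, G, List.map_cons, List.sum_cons]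
        simp only [G] at this
        omega
      · simp only [if_neg hc]
        simp only [G] at this ⊢
        omega


lemma wcnt_eq_G (d : List Int) (m : Nat) (hm : 1 ≤ m) : wcnt d m = G (runsA d 0) m := by
  have := G_runsA d m hm 0
  omega


lemma fA_cast (d : List Int) (m : Nat) : fA d (m : Int) = (wcnt d m : Int) := by
  unfold fA wcnt
  rw [PySem.List.pyRange_zero_natCast, List.map_map]
  have h : ∀ i : Nat,
      ((fun i : Int => if PySem.List.slice d (some i) (some (i + (m:Int))) = PySem.List.pyRepeat [(1:Int)] (m:Int) then (1:Int) else 0) ∘ (fun k : Nat => (k : Int))) i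
      = (fun i : Nat => if ((d.drop i).take m == List.replicate m 1) = true then (1:Int) else 0) i := by
    intro i
    simp only [Function.comp, PySem.List.slice_natCast_add, PySem.List.pyRepeat_singleton,
      Int.toNat_natCast, beq_iff_eq]
  rw [List.map_congr_left (fun i _ => h i)]
  exact PySem.List.sum_map_ite_one_zero _ _


def maxRun (d : List Int) : Nat := (runsA d 0).foldr max 0


lemma le_foldr_max (rs : List Nat) (L : Nat) (h : L ∈ rs) : L ≤ rs.foldr max 0 := by
  induction rs with
  | nil => cases h
  | cons a t ih =>
    rcases List.mem_cons.mp h with rfl | h2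
    · simp [List.foldr]
    · simp only [List.foldr_cons]
      exact le_trans (ih h2) (Nat.le_max_right _ _)


lemma foldr_max_mem (rs : List Nat) : rs.foldr max 0 = 0 ∨ rs.foldr max 0 ∈ rs := by
  induction rs with
  | nil => left; rfl
  | cons a t ih =>
    simp only [List.foldr_cons]
    rcases Nat.le_total a (t.foldr max 0) with h | h
    · rw [Nat.max_eq_right h]
      rcases ih with h2 | h2
      · left; exact h2
      · right; exact List.mem_cons_of_mem _ h2
    · rw [Nat.max_eq_left h]
      right; exact List.mem_cons_self


lemma runsA_le_len : ∀ (d : List Int) (c : Nat), ∀ L ∈ runsA d c, L ≤ c + d.length := by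
  intro d
  induction d with
  | nil => intro c L hL; simp only [runsA] at hL; split_ifs at hL <;> simp_all <;> omega
  | cons a t ih =>
    intro c L hL
    simp only [runsA] at hL
    split_ifs at hL with h1 h2
    · have := ih (c + 1) L hL; simp only [List.length_cons]; omega
    · rcases List.mem_cons.mp hL with rfl | h3
      · simp only [List.length_cons]; omega
      · have := ih 0 L h3; simp only [List.length_cons]; omega
    · have := ih 0 L hL; simp only [List.length_cons]; omega


lemma maxRun_le (d : List Int) : maxRun d ≤ d.length := by
  rcases foldr_max_mem (runsA d 0) with h | h
  · rw [maxRun, h]; omega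
  · have := runsA_le_len d 0 _ h; simpa [maxRun] using this


lemma fA_ne_zero_iff (d : List Int) (m : Nat) (hm : 1 ≤ m) :
    fA d (m : Int) ≠ 0 ↔ m ≤ maxRun d := by
  rw [fA_cast, wcnt_eq_G d m hm]
  rw [Ne, Int.natCast_eq_zero]
  constructor
  · intro h
    have : ∃ x ∈ (runsA d 0).map (fun L => L + 1 - m), x ≠ 0 := by
      by_contra hall
      push_neg at hall
      exact h (List.sum_eq_zero_iff.mpr hall)
    rcases this with ⟨x, hx, hxne⟩
    rcases List.mem_map.mp hx with ⟨L, hL, rfl⟩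
    have h1 : m ≤ L := by omega
    exact le_trans h1 (le_foldr_max _ _ hL)
  · intro h hsum
    have hmem : maxRun d ∈ runsA d 0 := by
      rcases foldr_max_mem (runsA d 0) with h2 | h2
      · rw [maxRun] at *; omega
      · exact h2
    have : maxRun d + 1 - m = 0 := by
      simp only [G] at hsum
      rw [List.sum_eq_zero_iff] at hsum
      exact hsum _ (List.mem_map.mpr ⟨_, hmem, rfl⟩)
    omega


lemma loop1A_spec (d : List Int) : ∀ (fuel : Nat) (n : Nat), 1 ≤ n → n ≤ max (maxRun d) 1 →
    max (maxRun d) 1 ≤ n + fuel → loop1A d fuel (n : Int) = ((max (maxRun d) 1 : Nat) : Int) := by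
  intro fuel
  induction fuel with
  | zero =>
    intro n h1 h2 h3
    have : n = max (maxRun d) 1 := by omega
    simp [loop1A, this]
  | succ fuel ih =>
    intro n h1 h2 h3
    have hcast : (n : Int) + 1 = ((n + 1 : Nat) : Int) := by push_cast; ring
    simp only [loop1A, hcast]
    by_cases h : fA d ((n + 1 : Nat) : Int) ≠ 0
    · rw [if_pos h]
      have hle : n + 1 ≤ maxRun d := (fA_ne_zero_iff d (n+1) (by omega)).mp h
      exact ih (n + 1) (by omega) (by omega) (by omega)
    · rw [if_neg h]
      push_neg at h
      have : ¬ (n + 1 ≤ maxRun d) := fun hc => ((fA_ne_zero_iff d (n+1) (by omega)).mpr hc) h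
      congr 1
      omega

-- list-range sum to Finset

lemma sumRange (n : Nat) (h : Nat → Int) : ((List.range n).map h).sum = ∑ k ∈ Finset.range n, h k := by
  induction n with
  | zero => simp
  | succ m ih => rw [List.range_succ, Finset.sum_range_succ, List.map_append, List.sum_append, ih]; simp


lemma sum_count (rs : List Nat) (N : Nat) (g : Nat → Int) (h : ∀ L ∈ rs, L < N) :
    (rs.map g).sum = ∑ k ∈ Finset.range N, (rs.count k : Int) * g k := by
  induction rs with
  | nil => simp
  | cons a t ih =>
    have ha : a ∈ Finset.range N := Finset.mem_range.mpr (h a List.mem_cons_self)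
    rw [List.map_cons, List.sum_cons, ih (fun L hL => h L (List.mem_cons_of_mem _ hL))]
    have : ∀ k, ((a :: t).count k : Int) * g k = (t.count k : Int) * g k + (if k = a then g k else 0) := by
      intro k
      rw [List.count_cons]
      by_cases hk : k = a
      · subst hk
        simp only [beq_self_eq_true, if_true, if_pos rfl]
        push_cast; ring
      · have hbeq : (a == k) = false := beq_eq_false_iff_ne.mpr (fun hc => hk hc.symm)
        simp only [hbeq, if_false, if_neg hk]
        push_cast; ring
    rw [Finset.sum_congr rfl (fun k _ => this k), Finset.sum_add_distrib, Finset.sum_ite_eq' _ a g, if_pos ha]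
    ring


lemma SUMS (d : List Int) (n : Nat) (h1 : 1 ≤ n) (h2 : n ≤ maxRun d) :
    fA d (n : Int) = ((runsA d 0).count n : Int)
      + ((List.range (maxRun d - n)).map
          (fun t => ((runsA d 0).count (maxRun d - t) : Int) * (((maxRun d - n : Nat) : Int) + 1 - (t : Int)))).sum := by
  have hMF : maxRun d = List.foldr max 0 (runsA d 0) := rfl
  have hall : ∀ L ∈ (runsA d 0), L < (maxRun d) + 1 := fun L hL => by
    have := le_foldr_max (runsA d 0) L hL; omega
  have step1 : fA d (n : Int) = ((runsA d 0).map (fun L => ((L + 1 - n : Nat) : Int))).sum := by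
    rw [fA_cast, wcnt_eq_G d n h1, G]
    rw [Nat.cast_list_sum, List.map_map]
    rfl
  rw [step1, sum_count (runsA d 0) ((maxRun d) + 1) _ hall]
  rw [← Finset.sum_range_reflect]
  have hshape : ∀ t ∈ Finset.range ((maxRun d) + 1),
      ((runsA d 0).count ((maxRun d) + 1 - 1 - t) : Int) * (((maxRun d) + 1 - 1 - t + 1 - n : Nat) : Int)
      = ((runsA d 0).count ((maxRun d) - t) : Int) * (((maxRun d) - t + 1 - n : Nat) : Int) := by
    intro t _; congr 2 <;> omega
  rw [Finset.sum_congr rfl hshape]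
  have hsub : Finset.range ((maxRun d) - n + 1) ⊆ Finset.range ((maxRun d) + 1) := by
    intro x hx
    rw [Finset.mem_range] at hx ⊢
    omega
  rw [← Finset.sum_subset hsub (by
    intro t ht hnt
    have ht1 : t < (maxRun d) + 1 := Finset.mem_range.mp ht
    have ht2 : ¬ t < (maxRun d) - n + 1 := fun hc => hnt (Finset.mem_range.mpr hc)
    have : ((maxRun d) - t + 1 - n : Nat) = 0 := by omega
    rw [this]; simp)]
  rw [Finset.sum_range_succ]
  have hlast : ((runsA d 0).count ((maxRun d) - ((maxRun d) - n)) : Int) * (((maxRun d) - ((maxRun d) - n) + 1 - n : Nat) : Int) = ((runsA d 0).count n : Int) := by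
    have e1 : (maxRun d) - ((maxRun d) - n) = n := by omega
    rw [e1]
    have e2 : (n + 1 - n : Nat) = 1 := by omega
    rw [e2]; simp
  rw [hlast]
  rw [sumRange ((maxRun d) - n) (fun t => (((runsA d 0).count ((maxRun d) - t) : Int) * ((((maxRun d) - n : Nat) : Int) + 1 - (t : Int))))]
  rw [Finset.sum_congr rfl (fun t ht => by
    have htlt : t < (maxRun d) - n := Finset.mem_range.mp ht
    have : (((maxRun d) - t + 1 - n : Nat) : Int) = (((maxRun d) - n : Nat) : Int) + 1 - (t : Int) := by omega
    rw [this])]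
  ring


def lFrom (d : List Int) (n : Nat) : List Int :=
  (List.range (maxRun d - n)).map (fun t => ((runsA d 0).count (maxRun d - t) : Int))


lemma loop2A_step (d : List Int) (n : Int) (l : List Int) (h : 1 < n) :
    loop2A d n l = loop2A d (n - 1)
      (l ++ [fA d n - ((l.zip (PySem.List.pyRange ((l.length : Int) + 1) 1 (-1))).map (fun p => p.1 * p.2)).sum]) := by
  rw [loop2A, dif_pos h]


lemma loop2A_spec (d : List Int) : ∀ (n : Nat), 1 ≤ n → n ≤ maxRun d →
    loop2A d (n : Int) (lFrom d n) = lFrom d 1 := by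
  intro n
  induction n with
  | zero => omega
  | succ m ih =>
    intro h1 h2
    by_cases hm : m = 0
    · subst hm
      rw [loop2A, dif_neg (by omega : ¬ (1:Int) < ((1:Nat):Int))]
    · rw [loop2A_step d _ _ (by push_cast; omega : (1:Int) < ((m+1:Nat):Int))]
      have hj : (lFrom d (m+1)).length = maxRun d - (m+1) := by
        simp [lFrom]
      have hr : PySem.List.pyRange (((lFrom d (m+1)).length : Int) + 1) 1 (-1)
          = (List.range (maxRun d - (m+1))).map (fun (k : Nat) => (((maxRun d - (m+1) : Nat) : Int) + 1) - (k : Int)) := by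
        rw [hj, PySem.List.pyRange_neg_one]
        have he : ((((maxRun d - (m+1) : Nat) : Int) + 1) - 1).toNat = maxRun d - (m+1) := by omega
        rw [he]
      rw [hr]
      have hzip : ((lFrom d (m+1)).zip ((List.range (maxRun d - (m+1))).map (fun (k : Nat) => (((maxRun d - (m+1) : Nat) : Int) + 1) - (k : Int)))).map (fun p => p.1 * p.2)
          = (List.range (maxRun d - (m+1))).map (fun (t : Nat) => ((runsA d 0).count (maxRun d - t) : Int) * ((((maxRun d - (m+1) : Nat)) : Int) + 1 - (t : Int))) := by
        rw [lFrom, List.zip_map', List.map_map]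
        rfl
      rw [hzip]
      have hx : fA d ((m+1 : Nat) : Int) - ((List.range (maxRun d - (m+1))).map (fun (t : Nat) => ((runsA d 0).count (maxRun d - t) : Int) * ((((maxRun d - (m+1) : Nat)) : Int) + 1 - (t : Int)))).sum
          = ((runsA d 0).count (m+1) : Int) := by
        rw [SUMS d (m+1) (by omega) h2]
        ring
      rw [hx]
      have happ : lFrom d (m+1) ++ [((runsA d 0).count (m+1) : Int)] = lFrom d m := by
        rw [lFrom, lFrom]
        have : maxRun d - m = (maxRun d - (m+1)) + 1 := by omega
        rw [this, List.range_succ, List.map_append]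
        congr 2
        have : maxRun d - (maxRun d - (m+1)) = m + 1 := by omega
        simp [this]
      rw [happ]
      have hcast : ((m+1 : Nat) : Int) - 1 = (m : Int) := by push_cast; ring
      rw [hcast]
      exact ih (by omega) (by omega)


lemma A_result (d : List Int) : run_lengths d = lFrom d 1 := by
  rw [run_lengths]
  have h1 : loop1A d (d.length + 1) 1 = ((max (maxRun d) 1 : Nat) : Int) := by
    have := loop1A_spec d (d.length + 1) 1 (le_refl 1) (by omega)
      (by have := maxRun_le d; omega)
    simpa using this
  rw [h1]
  by_cases h : maxRun d ≤ 1
  · have hmax : max (maxRun d) 1 = 1 := by omega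
    rw [hmax, loop2A, dif_neg (by omega : ¬ (1:Int) < ((1:Nat):Int))]
    rw [lFrom]
    have : maxRun d - 1 = 0 := by omega
    rw [this]
    simp
  · have hmax : max (maxRun d) 1 = maxRun d := by omega
    rw [hmax]
    have hempty : lFrom d (maxRun d) = [] := by
      rw [lFrom]; simp
    rw [← hempty]
    exact loop2A_spec d (maxRun d) (by omega) (le_refl _)


def flushD (s : PySem.Dict Int Int × Int) (L : Nat) : PySem.Dict Int Int × Int :=
  (s.1.insert (L : Int) (s.1.getD (L : Int) 0 + 1), if ((L : Int) > s.2) then (L : Int) else s.2)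


lemma Bfold : ∀ (rest : List Int) (c : PySem.Dict Int Int) (lg : Int) (n : Nat),
    (rest ++ [0]).foldl stepB (c, lg, (n : Int)) =
      (((runsA rest n).foldl flushD (c, lg)).1, ((runsA rest n).foldl flushD (c, lg)).2, 0) := by
  intro rest
  induction rest with
  | nil =>
    intro c lg n
    by_cases hn : n = 0
    · subst hn
      simp [stepB, runsA, flushD]
    · have h1 : ((n : Int) ≠ 0) := by exact_mod_cast hn
      simp only [List.nil_append, List.foldl_cons, List.foldl_nil, stepB]
      rw [if_neg (by norm_num : ¬ (0:Int) = 1), if_pos h1]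
      simp [runsA, Nat.pos_of_ne_zero hn, flushD]
  | cons a t ih =>
    intro c lg n
    simp only [List.cons_append, List.foldl_cons]
    by_cases ha : a = 1
    · subst ha
      have hc : stepB (c, lg, (n : Int)) 1 = (c, lg, ((n + 1 : Nat) : Int)) := by
        simp [stepB]
      rw [hc, ih c lg (n + 1)]
      simp [runsA]
    · by_cases hn : n = 0
      · subst hn
        have hc : stepB (c, lg, ((0:Nat) : Int)) a = (c, lg, ((0:Nat) : Int)) := by
          simp [stepB, ha]
        rw [hc, ih c lg 0]
        simp [runsA, ha]
      · have h1 : ((n : Int) ≠ 0) := by exact_mod_cast hn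
        have hc : stepB (c, lg, (n : Int)) a
            = ((flushD (c, lg) n).1, (flushD (c, lg) n).2, ((0:Nat) : Int)) := by
          simp [stepB, ha, h1, flushD, hn]
        rw [hc, ih _ _ 0]
        have hruns : runsA (a :: t) n = n :: runsA t 0 := by
          simp [runsA, ha, Nat.pos_of_ne_zero hn]
        rw [hruns]
        simp [List.foldl_cons]


lemma flushAll_getD (rs : List Nat) : ∀ (c : PySem.Dict Int Int) (lg : Int) (k : Nat),
    ((rs.foldl flushD (c, lg)).1).getD (k : Int) 0 = c.getD (k : Int) 0 + (rs.count k : Int) := by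
  induction rs with
  | nil => intro c lg k; simp
  | cons L t ih =>
    intro c lg k
    rw [List.foldl_cons, ih]
    rw [List.count_cons]
    by_cases hk : k = L
    · subst hk
      simp only [flushD, PySem.Dict.getD_insert, if_pos rfl, beq_self_eq_true, if_true]
      push_cast; ring
    · have hki : (k : Int) ≠ (L : Int) := by exact_mod_cast hk
      have hbeq : (L == k) = false := beq_eq_false_iff_ne.mpr (fun hc => hk hc.symm)
      simp only [flushD, PySem.Dict.getD_insert, if_neg hki, hbeq, if_false]
      push_cast; ring


lemma foldr_max_swap : ∀ (t : List Nat) (g L : Nat), t.foldr max (max g L) = max L (t.foldr max g) := by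
  intro t
  induction t with
  | nil => intro g L; simp [Nat.max_comm]
  | cons a t ih => intro g L; simp only [List.foldr_cons, ih]; omega


lemma flushAll_snd (rs : List Nat) : ∀ (c : PySem.Dict Int Int) (g : Nat),
    (rs.foldl flushD (c, (g : Int))).2 = ((rs.foldr max g : Nat) : Int) := by
  induction rs with
  | nil => intro c g; rfl
  | cons L t ih =>
    intro c g
    rw [List.foldl_cons]
    have hsnd : (flushD (c, (g : Int)) L).2 = ((max g L : Nat) : Int) := by
      simp only [flushD]
      split_ifs with h <;> omega
    have hfst : flushD (c, (g : Int)) L = ((flushD (c, (g : Int)) L).1, ((max g L : Nat) : Int)) := by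
      rw [← hsnd]
    rw [hfst, ih _ (max g L), foldr_max_swap]
    rw [List.foldr_cons]


lemma B_result (d : List Int) : run_lengths_alt d = lFrom d 1 := by
  rw [run_lengths_alt]
  have h0 : ((0:Int)) = ((0:Nat) : Int) := rfl
  have hB := Bfold d PySem.Dict.empty 0 0
  simp only [Nat.cast_zero] at hB
  rw [hB]
  have hsnd := flushAll_snd (runsA d 0) PySem.Dict.empty 0
  simp only [Nat.cast_zero] at hsnd
  rw [hsnd]
  have hmr : (runsA d 0).foldr max 0 = maxRun d := rfl
  rw [hmr, PySem.List.pyRange_neg_one, List.map_map]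
  have hlen : (((maxRun d : Nat) : Int) - 1).toNat = maxRun d - 1 := by omega
  rw [hlen, lFrom]
  apply List.map_congr_left
  intro k hk
  have hklt : k < maxRun d - 1 := List.mem_range.mp hk
  have hcast : ((maxRun d : Nat) : Int) - (k : Int) = ((maxRun d - k : Nat) : Int) := by omega
  simp only [Function.comp_apply, hcast]
  have := flushAll_getD (runsA d 0) PySem.Dict.empty 0 (maxRun d - k)
  rw [this]
  simp

-- ===== VERDICT (by name: the statement is the Claim_ definition above) =====
theorem run_lengths_spec : Claim_equal_run_lengths := by
  intro differences _
  unfold Spec_run_lengths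
  rw [A_result, B_result]
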